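-- pv_equiv track=rewrite | github.com/Boehringer-Ingelheim/topolearn | notebooks/utils.py | format_life_col
-- ===== SOURCE A (Python) =====
-- def format_life_col(col):
--     components = col.split("_")
--     symbol = ""
--     norm = ""
--     idx = ""
--     agg = ""
--     train = ""
--     for comp in components:
--         if comp == "lifetimes":
--             symbol = "L"
--         elif comp == "midlifes":
--             symbol = "M"
--         if comp == "norm":
--             norm = comp
--         if comp == "0":
--             idx = comp
--         if comp == "1":
--             idx = comp
--         if comp in ["var", "sum", "max", "mean", "min"]:
--             agg = comp
--         if comp == "train":
--             train = comp
--     idxn = "{" + idx + "}" if train == "" else "{" + idx + "," + train + "}"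
--     aggn = "{" + agg + "}" if norm == "" else "{" + agg + "," + norm + "}"
--     symbolic_form = f"${symbol}_{idxn}^{aggn}$"
--     return r'{}'.format(symbolic_form)
-- ===== SOURCE B (Python) =====
-- AGGS = ("var", "sum", "max", "mean", "min")
--
-- def _last_in(comps, keys):
--     matches = [c for c in comps if c in keys]
--     return matches[-1] if matches else ""
--
-- def format_life_col(col):
--     comps = col.split("_")
--     symbol = {"lifetimes": "L", "midlifes": "M"}.get(_last_in(comps, ("lifetimes", "midlifes")), "")
--     idx = _last_in(comps, ("0", "1"))
--     agg = _last_in(comps, AGGS)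
--     norm = "norm" if "norm" in comps else ""
--     train = "train" if "train" in comps else ""
--     idxn = "{" + idx + "}" if not train else "{" + idx + "," + train + "}"
--     aggn = "{" + agg + "}" if not norm else "{" + agg + "," + norm + "}"
--     return f"${symbol}_{idxn}^{aggn}$"
-- ===== Notes on version B (the rewrite author's own statement) =====
-- stated objective: alternative
-- what changed: Replaces A's single fold carrying five mutable fields through stacked conditionals with an independent per-field extraction: each field is the last component matching its own token set (via a filter + [-1]) or a plain membership test, then the same LaTeX string is assembled.
import Mathlib
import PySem

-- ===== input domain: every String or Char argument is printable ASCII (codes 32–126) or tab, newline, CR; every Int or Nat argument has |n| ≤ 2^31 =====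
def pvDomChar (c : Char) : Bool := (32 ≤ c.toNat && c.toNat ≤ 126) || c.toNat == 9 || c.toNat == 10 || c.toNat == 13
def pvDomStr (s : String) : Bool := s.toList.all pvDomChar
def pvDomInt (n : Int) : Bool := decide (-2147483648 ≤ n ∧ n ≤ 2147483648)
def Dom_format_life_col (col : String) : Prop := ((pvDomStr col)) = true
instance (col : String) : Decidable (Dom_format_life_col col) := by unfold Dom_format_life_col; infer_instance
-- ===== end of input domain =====

-- B replaces A's single five-field fold with independent per-field extraction (filter + last, membership tests); same output.

-- ===== PORT A =====
-- one loop iteration of A, carried state (symbol, norm, idx, agg, train)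
def pvAStep (st : String × String × String × String × String) (comp : String) :
    String × String × String × String × String :=
  let symbol := if comp == "lifetimes" then "L" else if comp == "midlifes" then "M" else st.1
  let norm := if comp == "norm" then comp else st.2.1
  let idx := if comp == "0" then comp else st.2.2.1
  let idx := if comp == "1" then comp else idx
  let agg := if ["var", "sum", "max", "mean", "min"].contains comp then comp else st.2.2.2.1
  let train := if comp == "train" then comp else st.2.2.2.2
  (symbol, norm, idx, agg, train)

def format_life_col (col : String) : String :=
  let components := (PySem.Str.split? col "_").getD []  -- sep ≠ "" so split? is some; exact port of col.split("_")
  let st := components.foldl pvAStep ("", "", "", "", "")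
  let idxn := if st.2.2.2.2 == "" then "{" ++ st.2.2.1 ++ "}" else "{" ++ st.2.2.1 ++ "," ++ st.2.2.2.2 ++ "}"
  let aggn := if st.2.1 == "" then "{" ++ st.2.2.2.1 ++ "}" else "{" ++ st.2.2.2.1 ++ "," ++ st.2.1 ++ "}"
  "$" ++ st.1 ++ "_" ++ idxn ++ "^" ++ aggn ++ "$"

-- ===== PORT B =====
-- matches[-1] if matches else "" (the last component in the key set)
def pvLastIn (comps : List String) (keys : List String) : String :=
  ((comps.filter (fun c => keys.contains c)).getLast?).getD ""

def format_life_col_alt (col : String) : String :=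
  let comps := (PySem.Str.split? col "_").getD []  -- sep ≠ "" so split? is some; exact port of col.split("_")
  let symbol := PySem.Dict.getD (PySem.Dict.ofList [("lifetimes", "L"), ("midlifes", "M")]) (pvLastIn comps ["lifetimes", "midlifes"]) ""
  let idx := pvLastIn comps ["0", "1"]
  let agg := pvLastIn comps ["var", "sum", "max", "mean", "min"]
  let norm := if comps.contains "norm" then "norm" else ""
  let train := if comps.contains "train" then "train" else ""
  let idxn := if train == "" then "{" ++ idx ++ "}" else "{" ++ idx ++ "," ++ train ++ "}"
  let aggn := if norm == "" then "{" ++ agg ++ "}" else "{" ++ agg ++ "," ++ norm ++ "}"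
  "$" ++ symbol ++ "_" ++ idxn ++ "^" ++ aggn ++ "$"

-- ===== PRECONDITION & SPEC =====
def Spec_format_life_col (col : String) (out : String) : Prop := out = format_life_col_alt col
instance (col : String) (out : String) : Decidable (Spec_format_life_col col out) := by unfold Spec_format_life_col; infer_instance

-- ===== CLAIM (what is proved, stated in full; the proofs are below) =====
def Claim_equal_format_life_col : Prop := ∀ (col : String), Dom_format_life_col col → Spec_format_life_col col (format_life_col col)

-- ===== LEMMAS AND PROOFS =====

-- B's five fields, as functions of the component list
def pvSymB (l : List String) : String :=
  PySem.Dict.getD (PySem.Dict.ofList [("lifetimes", "L"), ("midlifes", "M")]) (pvLastIn l ["lifetimes", "midlifes"]) ""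
def pvNormB (l : List String) : String := if l.contains "norm" then "norm" else ""
def pvIdxB (l : List String) : String := pvLastIn l ["0", "1"]
def pvAggB (l : List String) : String := pvLastIn l ["var", "sum", "max", "mean", "min"]
def pvTrainB (l : List String) : String := if l.contains "train" then "train" else ""

theorem pvLastIn_append (l : List String) (c : String) (keys : List String) :
    pvLastIn (l ++ [c]) keys = if keys.contains c then c else pvLastIn l keys := by
  simp only [pvLastIn, List.filter_append, List.filter_cons, List.filter_nil]
  split_ifs with h <;> simp [h]

theorem pv_loop_eq (l : List String) :
    l.foldl pvAStep ("", "", "", "", "") = (pvSymB l, pvNormB l, pvIdxB l, pvAggB l, pvTrainB l) := by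
  induction l using List.reverseRecOn with
  | nil => decide
  | append_singleton l c ih =>
    rw [List.foldl_append, List.foldl_cons, List.foldl_nil, ih]
    simp only [pvAStep]
    refine Prod.ext ?_ (Prod.ext ?_ (Prod.ext ?_ (Prod.ext ?_ ?_)))
    · -- symbol
      simp only [pvSymB, pvLastIn_append, List.contains_cons, List.contains_nil]
      by_cases h1 : c = "lifetimes" <;> by_cases h2 : c = "midlifes" <;>
        simp [h1, h2] <;> decide
    · -- norm
      simp only [pvNormB, List.contains_append, List.contains_cons, List.contains_nil]
      by_cases h : c = "norm" <;> simp [h, eq_comm (a := "norm")]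
    · -- idx
      simp only [pvIdxB, pvLastIn_append, List.contains_cons, List.contains_nil]
      by_cases h4 : c = "0" <;> by_cases h5 : c = "1" <;> simp [h4, h5]
    · -- agg
      simp only [pvAggB, pvLastIn_append]
    · -- train
      simp only [pvTrainB, List.contains_append, List.contains_cons, List.contains_nil]
      by_cases h : c = "train" <;> simp [h, eq_comm (a := "train")]

-- ===== VERDICT (by name: the statement is the Claim_ definition above) =====
theorem format_life_col_spec : Claim_equal_format_life_col := by
  intro col _
  show _ = _
  simp only [format_life_col, format_life_col_alt, pv_loop_eq]
  rfl
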